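-- pv_equiv track=rewrite | github.com/imrying/discrete | tools.py | count_subsets1
-- ===== SOURCE A (Python) =====
-- import math
--
-- def count_subsets1(A, size=None, max_element=None, even_elements=False):
--     if size is not None:
--         # Count subsets of exact size
--         return math.comb(len(A), size)
--     elif max_element is not None:
--         # Count subsets that do not contain any element greater than max_element
--         filtered_A = [elem for elem in A if elem <= max_element]
--         return 2 ** len(filtered_A)
--     elif even_elements:
--         # Count subsets with an even number of elements
--         total_subsets = 2 ** len(A)
--         even_subsets = sum(math.comb(len(A), k) for k in range(0, len(A) + 1, 2))
--         return even_subsets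
--     else:
--         return 0
-- ===== SOURCE B (Python) =====
-- import math
--
-- def _prod_range(lo, hi):
--     # product of the integers lo..hi inclusive, by binary splitting
--     if hi - lo < 32:
--         r = 1
--         for x in range(lo, hi + 1):
--             r = r * x
--         return r
--     m = (lo + hi) // 2
--     return _prod_range(lo, m) * _prod_range(m + 1, hi)
--
-- def count_subsets1(A, size=None, max_element=None, even_elements=False):
--     if size is not None:
--         # binomial as falling factorial / k!, using C(n,k) = C(n,n-k)
--         n = len(A)
--         if size < 0 or size > n:
--             return 0
--         k = min(size, n - size)
--         return _prod_range(n - k + 1, n) // math.factorial(k)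
--     if max_element is not None:
--         c = sum(1 for e in A if e <= max_element)
--         return 2 ** c
--     if even_elements:
--         # closed form: number of even-size subsets is 2^(n-1) for n >= 1, else 1
--         n = len(A)
--         return 1 if n == 0 else 2 ** (n - 1)
--     return 0
-- ===== Notes on version B (the rewrite author's own statement) =====
-- stated objective: alternative
-- what changed: size branch computes the binomial as a binary-split falling factorial divided by k! (using C(n,k)=C(n,n-k)) instead of math.comb, max_element branch counts qualifying elements in one generator pass instead of materialising a filtered list, and the even branch replaces the loop summing binomials with the closed form 2^(n-1) (1 for n=0).
import Mathlib
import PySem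

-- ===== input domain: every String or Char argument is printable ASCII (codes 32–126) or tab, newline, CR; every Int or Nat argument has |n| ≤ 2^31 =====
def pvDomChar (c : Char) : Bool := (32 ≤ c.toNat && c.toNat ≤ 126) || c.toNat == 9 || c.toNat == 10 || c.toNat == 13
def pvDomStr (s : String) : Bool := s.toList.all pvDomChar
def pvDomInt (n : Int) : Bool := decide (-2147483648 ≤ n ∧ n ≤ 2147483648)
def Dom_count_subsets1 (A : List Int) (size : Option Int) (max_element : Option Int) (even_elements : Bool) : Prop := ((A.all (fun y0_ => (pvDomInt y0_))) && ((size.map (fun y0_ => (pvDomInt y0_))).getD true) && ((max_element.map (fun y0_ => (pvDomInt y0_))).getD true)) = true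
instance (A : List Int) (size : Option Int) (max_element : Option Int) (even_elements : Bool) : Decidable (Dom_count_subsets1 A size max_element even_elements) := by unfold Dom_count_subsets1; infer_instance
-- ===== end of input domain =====

-- B replaces A's math.comb call by a binary-split falling factorial divided by k!,
-- A's filtered-list materialisation by a one-pass count, and A's loop summing binomials
-- by the closed form 2^(n-1) (1 for n = 0); objective: alternative.

-- ===== PORT A =====
def count_subsets1 (A : List Int) (size : Option Int) (max_element : Option Int) (even_elements : Bool) : Int :=
  match size with
  | some s => (Nat.choose A.length s.toNat : Int)  -- math.comb(len(A), size); Pre_ gives 0 ≤ s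
  | none =>
    match max_element with
    | some m => 2 ^ (A.filter (fun elem => decide (elem ≤ m))).length
    | none =>
      if even_elements then
        let _total_subsets : Int := 2 ^ A.length  -- computed but unused in A
        (PySem.List.pyRange 0 ((A.length : Int) + 1) 2).foldl
          (fun acc k => acc + (Nat.choose A.length k.toNat : Int)) 0
      else 0

-- ===== PORT B =====
-- product of the integers lo..hi inclusive, by binary splitting (B's _prod_range)
def prodRange (lo hi : Int) : Int :=
  if hi - lo < 32 then
    (PySem.List.pyRange lo (hi + 1) 1).foldl (fun r x => r * x) 1
  else
    let m := PySem.Int.floordiv (lo + hi) 2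
    prodRange lo m * prodRange (m + 1) hi
termination_by (hi + 1 - lo).toNat
decreasing_by
  all_goals
    have hle : lo ≤ hi := by omega
    have hmid := PySem.Int.floordiv_two_mid_bounds hle
    have hlt : ¬ hi ≤ PySem.Int.floordiv (lo + hi) 2 := by
      rw [PySem.Int.le_floordiv_iff_mul_le (by norm_num)]
      omega
    omega

def count_subsets1_alt (A : List Int) (size : Option Int) (max_element : Option Int) (even_elements : Bool) : Int :=
  match size with
  | some s =>
    let n : Int := A.length
    if s < 0 ∨ n < s then 0
    else
      let k : Int := min s (n - s)
      PySem.Int.floordiv (prodRange (n - k + 1) n) (Nat.factorial k.toNat : Int)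
  | none =>
    match max_element with
    | some m =>
      let c : Int := A.foldl (fun c e => if e ≤ m then c + 1 else c) 0
      2 ^ c.toNat
    | none =>
      if even_elements then
        if A.length = 0 then 1 else 2 ^ (A.length - 1)
      else 0

-- ===== PRECONDITION & SPEC =====
-- Pre_ excludes only size = some s with s < 0: there math.comb raises ValueError.
def Pre_count_subsets1 (A : List Int) (size : Option Int) (max_element : Option Int) (even_elements : Bool) : Prop :=
  0 ≤ size.getD 0
instance (A : List Int) (size : Option Int) (max_element : Option Int) (even_elements : Bool) : Decidable (Pre_count_subsets1 A size max_element even_elements) := by unfold Pre_count_subsets1; infer_instance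
def pvWitness_count_subsets1 : List Int × Option Int × Option Int × Bool := ([1, 2, 3], some 2, none, false)

def Spec_count_subsets1 (A : List Int) (size : Option Int) (max_element : Option Int) (even_elements : Bool) (out : Int) : Prop := out = count_subsets1_alt A size max_element even_elements
instance (A : List Int) (size : Option Int) (max_element : Option Int) (even_elements : Bool) (out : Int) : Decidable (Spec_count_subsets1 A size max_element even_elements out) := by unfold Spec_count_subsets1; infer_instance

-- ===== CLAIM (what is proved, stated in full; the proofs are below) =====
def Claim_equal_count_subsets1 : Prop := ∀ (A : List Int) (size : Option Int) (max_element : Option Int) (even_elements : Bool), Dom_count_subsets1 A size max_element even_elements → Pre_count_subsets1 A size max_element even_elements → Spec_count_subsets1 A size max_element even_elements (count_subsets1 A size max_element even_elements)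

-- ===== LEMMAS AND PROOFS =====

-- a multiplicative foldl can be peeled off its initial value
theorem foldl_mul_init (l : List Int) (a : Int) :
    l.foldl (fun r x => r * x) a = a * l.foldl (fun r x => r * x) 1 := by
  induction l generalizing a with
  | nil => simp
  | cons x t ih =>
    simp only [List.foldl_cons]
    rw [ih (a * x), ih (1 * x)]
    ring

-- the binary-splitting product equals the plain left-to-right product
theorem prodRange_eq (lo hi : Int) :
    prodRange lo hi = (PySem.List.pyRange lo (hi + 1) 1).foldl (fun r x => r * x) 1 := by
  rw [prodRange]
  split
  · rfl
  · rename_i hbig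
    have hle : lo ≤ hi := by omega
    have hmid := PySem.Int.floordiv_two_mid_bounds hle
    set m := PySem.Int.floordiv (lo + hi) 2 with hm
    show prodRange lo m * prodRange (m + 1) hi = _
    rw [prodRange_eq lo m, prodRange_eq (m + 1) hi,
        PySem.List.pyRange_one_append lo (m + 1) (hi + 1) (by omega) (by omega),
        List.foldl_append,
        foldl_mul_init (PySem.List.pyRange (m + 1) (hi + 1))
          (List.foldl (fun r x => r * x) 1 (PySem.List.pyRange lo (m + 1)))]
termination_by (hi + 1 - lo).toNat
decreasing_by
  all_goals
    have hlt : ¬ hi ≤ PySem.Int.floordiv (lo + hi) 2 := by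
      rw [PySem.Int.le_floordiv_iff_mul_le (by norm_num)]
      omega
    omega

-- the product of (N-k+1)..N is the descending factorial
theorem prod_desc (N k : Nat) (hk : k ≤ N) :
    (PySem.List.pyRange (((N - k : Nat) : Int) + 1) ((N : Int) + 1) 1).foldl
        (fun r x => r * x) 1
      = (Nat.descFactorial N k : Int) := by
  induction k with
  | zero =>
    rw [PySem.List.pyRange_one_eq_nil (by omega)]
    simp
  | succ k ih =>
    rw [PySem.List.pyRange_one_cons (by omega), List.foldl_cons, foldl_mul_init,
        show ((N - (k + 1) : Nat) : Int) + 1 + 1 = ((N - k : Nat) : Int) + 1 by omega,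
        ih (by omega), Nat.descFactorial_succ]
    push_cast
    have : ((N - (k + 1) : Nat) : Int) + 1 = ((N - k : Nat) : Int) := by omega
    rw [this]
    have : ((N - k : Nat) : Int) = (N : Int) - (k : Int) := by omega
    rw [this]
    ring

-- B's size branch computes the binomial coefficient
theorem binom_fact_eq (N : Nat) (s : Int) (h0 : 0 ≤ s) (hs : s ≤ (N : Int)) :
    PySem.Int.floordiv (prodRange ((N : Int) - min s ((N : Int) - s) + 1) (N : Int))
        (Nat.factorial (min s ((N : Int) - s)).toNat : Int)
      = (Nat.choose N s.toNat : Int) := by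
  set k : Int := min s ((N : Int) - s) with hkdef
  have hk0 : 0 ≤ k := by omega
  have hkN : k.toNat ≤ N := by omega
  have harg : (N : Int) - k + 1 = ((N - k.toNat : Nat) : Int) + 1 := by omega
  rw [harg, prodRange_eq, prod_desc N k.toNat hkN,
      Nat.descFactorial_eq_factorial_mul_choose,
      show ((Nat.factorial k.toNat * Nat.choose N k.toNat : Nat) : Int)
          = ((Nat.choose N k.toNat * Nat.factorial k.toNat : Nat) : Int) by push_cast; ring,
      PySem.Int.floordiv_natCast, Nat.mul_div_cancel _ (Nat.factorial_pos _)]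
  congr 1
  rcases le_or_gt s ((N : Int) - s) with hle | hgt
  · rw [hkdef, min_eq_left hle]
  · rw [hkdef, min_eq_right (by omega)]
    have hknat : ((N : Int) - s).toNat = N - s.toNat := by omega
    rw [hknat]
    exact Nat.choose_symm (by omega)

-- one-pass count = length of the filtered list
theorem count_le_eq (A : List Int) (m : Int) (c : Int) :
    A.foldl (fun c e => if e ≤ m then c + 1 else c) c
      = c + ((A.filter (fun e => decide (e ≤ m))).length : Int) := by
  induction A generalizing c with
  | nil => simp
  | cons a t ih =>
    by_cases h : a ≤ m <;> simp [List.filter, h, ih] <;> ring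

-- sum of even-indexed binomial coefficients
theorem even_choose_sum (n : Nat) :
    ((List.range ((n + 2) / 2)).map (fun j => (Nat.choose n (2 * j) : Int))).sum
      = if n = 0 then 1 else 2 ^ (n - 1) := by
  -- pass to a Finset sum
  have hlist : ∀ (m : Nat) (f : Nat → Int),
      ((List.range m).map f).sum = ∑ j ∈ Finset.range m, f j := by
    intro m f
    induction m with
    | zero => simp
    | succ k ih => rw [List.range_succ, Finset.sum_range_succ]; simp [ih]
  rw [hlist]
  -- the (1 + (-1)^i)-weighted sum
  have hA : ∑ i ∈ Finset.range (n + 1), ((1 + (-1) ^ i) * (Nat.choose n i : Int))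
      = 2 ^ n + (if n = 0 then 1 else 0) := by
    have h1 : ∑ i ∈ Finset.range (n + 1), ((1 + (-1) ^ i) * (Nat.choose n i : Int))
        = ∑ i ∈ Finset.range (n + 1), ((Nat.choose n i : Int)
            + (-1) ^ i * (Nat.choose n i : Int)) := by
      apply Finset.sum_congr rfl
      intro i _
      ring
    rw [h1, Finset.sum_add_distrib, Int.alternating_sum_range_choose]
    congr 1
    have := Nat.sum_range_choose n
    exact_mod_cast congrArg (fun x : Nat => (x : Int)) this
  -- each term is 2·choose on even indices, 0 on odd ones
  have hB : ∑ i ∈ Finset.range (n + 1), ((1 + (-1) ^ i) * (Nat.choose n i : Int))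
      = ∑ i ∈ Finset.range (n + 1),
          (if i % 2 = 0 then 2 * (Nat.choose n i : Int) else 0) := by
    apply Finset.sum_congr rfl
    intro i _
    rcases Nat.even_or_odd i with he | ho
    · rw [he.neg_one_pow, if_pos (Nat.even_iff.mp he)]; ring
    · rw [ho.neg_one_pow, if_neg (by have := Nat.odd_iff.mp ho; omega)]
      ring
  -- reindex the even positions by halving
  have hC : ∑ i ∈ Finset.range (n + 1),
        (if i % 2 = 0 then 2 * (Nat.choose n i : Int) else 0)
      = ∑ j ∈ Finset.range ((n + 2) / 2), 2 * (Nat.choose n (2 * j) : Int) := by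
    rw [← Finset.sum_filter]
    apply Finset.sum_nbij' (fun i => i / 2) (fun j => 2 * j)
    · intro a ha
      simp only [Finset.mem_filter, Finset.mem_range] at ha ⊢
      omega
    · intro a ha
      simp only [Finset.mem_filter, Finset.mem_range] at ha ⊢
      omega
    · intro a ha
      simp only [Finset.mem_filter, Finset.mem_range] at ha
      omega
    · intro a ha
      omega
    · intro a ha
      simp only [Finset.mem_filter, Finset.mem_range] at ha
      have h2a : 2 * (a / 2) = a := by omega
      rw [h2a]
  have hE : 2 * ∑ j ∈ Finset.range ((n + 2) / 2), (Nat.choose n (2 * j) : Int)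
      = 2 ^ n + (if n = 0 then 1 else 0) := by
    rw [Finset.mul_sum, ← hC, ← hB, hA]
  rcases Nat.eq_zero_or_pos n with h0 | hpos
  · subst h0; decide
  · rw [if_neg (by omega)] at hE ⊢
    have h2 : (2 : Int) ^ n = 2 * 2 ^ (n - 1) := by
      rw [← pow_succ']
      congr 1
      omega
    rw [h2, add_zero] at hE
    exact mul_left_cancel₀ (two_ne_zero) hE

-- ===== VERDICT (by name: the statement is the Claim_ definition above) =====
theorem count_subsets1_spec : Claim_equal_count_subsets1 := by
  intro A size max_element even_elements _hdom hpre
  unfold Spec_count_subsets1 count_subsets1 count_subsets1_alt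
  match size with
  | some s =>
    simp only
    have hs : 0 ≤ s := hpre
    by_cases hbig : (A.length : Int) < s
    · rw [if_pos (Or.inr hbig)]
      have : A.length < s.toNat := by omega
      simp [Nat.choose_eq_zero_of_lt this]
    · rw [if_neg (by omega)]
      have hk : s.toNat ≤ A.length := by omega
      rw [← binom_fact_eq A.length s hs (by omega)]
  | none =>
    match max_element with
    | some m =>
      simp only [count_le_eq A m 0]
      norm_num
    | none =>
      cases even_elements with
      | false => simp
      | true =>
        simp only [if_pos]
        rw [PySem.List.foldl_add]
        rw [PySem.List.pyRange_of_pos 0 ((A.length : Int) + 1) (by norm_num)]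
        rw [if_pos (by positivity)]
        have harg : (((A.length : Int) + 1 - 0 + 2 - 1) / 2).toNat = (A.length + 2) / 2 := by
          omega
        rw [harg, List.map_map]
        have hmap : ((fun k : Int => (Nat.choose A.length k.toNat : Int)) ∘ fun k : Nat => 0 + 2 * (k : Int))
            = fun j : Nat => (Nat.choose A.length (2 * j) : Int) := by
          funext j; simp
          congr 1
        rw [hmap, even_choose_sum]
        by_cases h0 : A.length = 0 <;> simp [h0]
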